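-- pv_equiv track=rewrite | github.com/SuperBiscuit1/Python_Coding2025 | dictionary.py | find_most_frequent_word
-- ===== SOURCE A (Python) =====
-- def find_most_frequent_word(words):
--     word_count = {}
--
--     # Count occurrences of each word
--     for word in words:
--         word = word.lower()  # Make case-insensitive
--         if word in word_count:
--             word_count[word] += 1
--         else:
--             word_count[word] = 1
--
--     # Find the word with maximum count
--     max_count = 0
--     most_frequent = []
--
--     for word, count in word_count.items():
--         if count > max_count:
--             max_count = count
--             most_frequent = [word]
--         elif count == max_count:
--             most_frequent.append(word)
--
--     return most_frequent, max_count
-- ===== SOURCE B (Python) =====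
-- def find_most_frequent_word(words):
--     lw = [w.lower() for w in words]
--     distinct = list(dict.fromkeys(lw))
--     max_count = max((lw.count(w) for w in distinct), default=0)
--     most_frequent = [w for w in distinct if lw.count(w) == max_count]
--     return most_frequent, max_count
-- ===== Notes on version B (the rewrite author's own statement) =====
-- stated objective: alternative
-- what changed: B drops A's hash counting table entirely: it deduplicates the lowercased list keeping first occurrences, recounts each distinct word by brute-force list.count scans, then takes the max of those counts (default=0) and filters the distinct words in a separate pass, instead of A's single-pass dict counting with a running-max winner loop.
import Mathlib
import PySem

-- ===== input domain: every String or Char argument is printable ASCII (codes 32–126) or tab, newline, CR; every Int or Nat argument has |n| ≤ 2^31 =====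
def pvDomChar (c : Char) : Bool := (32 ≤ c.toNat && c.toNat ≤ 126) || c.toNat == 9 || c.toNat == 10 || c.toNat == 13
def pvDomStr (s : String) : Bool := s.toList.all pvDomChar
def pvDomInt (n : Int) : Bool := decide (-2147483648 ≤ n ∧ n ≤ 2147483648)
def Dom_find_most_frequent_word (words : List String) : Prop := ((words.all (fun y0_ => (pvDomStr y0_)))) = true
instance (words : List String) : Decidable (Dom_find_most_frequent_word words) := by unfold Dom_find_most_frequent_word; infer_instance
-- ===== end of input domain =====

-- B drops A's hash counting table: ordered dedup of the lowercased words, brute-force list.count per distinct word, staged max (default 0) then filter.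

-- ===== PORT A =====
def find_most_frequent_word (words : List String) : List String × Int :=
  let word_count : PySem.Dict String Int :=
    words.foldl (fun d w =>
      let word := PySem.Str.lower w
      if d.contains word then d.insert word (d.getD word 0 + 1)
      else d.insert word 1) PySem.Dict.empty
  let st :=
    word_count.items.foldl (fun (acc : List String × Int) p =>
      if p.2 > acc.2 then ([p.1], p.2)
      else if p.2 == acc.2 then (acc.1 ++ [p.1], acc.2)
      else acc) ([], 0)
  (st.1, st.2)

-- ===== PORT B =====
def find_most_frequent_word_alt (words : List String) : List String × Int :=
  let lw := words.map PySem.Str.lower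
  let distinct := PySem.List.dedup lw
  let max_count := (PySem.List.max? (distinct.map (fun w => (PySem.List.count lw w : Int))) (fun x => x)).getD 0
  let most_frequent := distinct.filter (fun w => (PySem.List.count lw w : Int) == max_count)
  (most_frequent, max_count)

-- ===== PRECONDITION & SPEC =====
def Spec_find_most_frequent_word (words : List String) (out : List String × Int) : Prop := out = find_most_frequent_word_alt words
instance (words : List String) (out : List String × Int) : Decidable (Spec_find_most_frequent_word words out) := by unfold Spec_find_most_frequent_word; infer_instance

-- ===== CLAIM (what is proved, stated in full; the proofs are below) =====
def Claim_equal_find_most_frequent_word : Prop := ∀ (words : List String), Dom_find_most_frequent_word words → Spec_find_most_frequent_word words (find_most_frequent_word words)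

-- ===== LEMMAS AND PROOFS =====

theorem dictA_eq (words : List String) :
    words.foldl (fun d w =>
      let word := PySem.Str.lower w
      if d.contains word then d.insert word (d.getD word 0 + 1)
      else d.insert word 1) PySem.Dict.empty
    = PySem.Dict.counter (words.map PySem.Str.lower) := by
  rw [← PySem.Dict.foldl_insert_getD_add_one_eq_counter, List.foldl_map]
  congr 1
  funext d w
  simp only []
  split
  · rfl
  · next h =>
    rw [PySem.Dict.getD_of_not_contains d 0 (by simpa using h)]
    norm_num

theorem runmax (l : List (String × Int)) (res : List String) (m : Int)
    (hl : ∀ p ∈ l, 0 ≤ p.2) :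
    l.foldl (fun (acc : List String × Int) p =>
      if p.2 > acc.2 then ([p.1], p.2)
      else if p.2 == acc.2 then (acc.1 ++ [p.1], acc.2)
      else acc) (res, m)
    = ((if l.foldl (fun a p => max a p.2) m = m then res else []) ++
        (l.filter (fun p => p.2 == l.foldl (fun a p => max a p.2) m)).map (·.1),
       l.foldl (fun a p => max a p.2) m) := by
  induction l generalizing res m with
  | nil => simp
  | cons p t ih =>
    have hle : max m p.2 ≤ t.foldl (fun a q => max a q.2) (max m p.2) := by
      have := PySem.List.le_foldl_max (t.map Prod.snd) (max m p.2)
      rw [List.foldl_map] at this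
      exact this.1
    simp only [List.foldl_cons]
    rcases lt_trichotomy m p.2 with hcase | hcase | hcase
    · rw [if_pos (by exact hcase)]
      rw [ih _ _ (fun q hq => hl q (List.mem_cons_of_mem _ hq))]
      have hmax : max m p.2 = p.2 := max_eq_right hcase.le
      rw [hmax] at hle
      simp only [hmax]
      have hne : t.foldl (fun a q => max a q.2) p.2 ≠ m := by omega
      rw [if_neg hne]
      simp only [List.filter_cons]
      by_cases hp : p.2 = t.foldl (fun a q => max a q.2) p.2
      · simp [← hp]
      · simp [Ne.symm hp, beq_eq_false_iff_ne.mpr hp]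
    · rw [if_neg (by omega), if_pos (beq_iff_eq.mpr hcase.symm)]
      rw [ih _ _ (fun q hq => hl q (List.mem_cons_of_mem _ hq))]
      have hmax : max m p.2 = m := max_eq_left hcase.ge
      simp only [hmax]
      simp only [List.filter_cons]
      by_cases hM : t.foldl (fun a q => max a q.2) m = m
      · have hb : (p.2 == t.foldl (fun a q => max a q.2) m) = true := beq_iff_eq.mpr (by omega)
        simp [hM, ← hcase]
      · have hb : (p.2 == t.foldl (fun a q => max a q.2) m) = false := beq_eq_false_iff_ne.mpr (by omega)
        have hb2 : ¬ (m = t.foldl (fun a q => max a q.2) m) := fun h => hM h.symm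
        simp [hM, hb]
    · rw [if_neg (by omega), if_neg (by simp; omega)]
      rw [ih _ _ (fun q hq => hl q (List.mem_cons_of_mem _ hq))]
      have hmax : max m p.2 = m := max_eq_left hcase.le
      rw [hmax] at hle
      simp only [hmax]
      simp only [List.filter_cons]
      have hb : (p.2 == t.foldl (fun a q => max a q.2) m) = false := beq_eq_false_iff_ne.mpr (by omega)
      simp [hb]

theorem max_eq (l : List Int) (hl : ∀ v ∈ l, (0 : Int) ≤ v) :
    (PySem.List.max? l (fun x => x)).getD 0 = l.foldl max 0 := by
  cases l with
  | nil => simp [PySem.List.max?]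
  | cons v t =>
    rw [PySem.List.max?_id_cons]
    have : max 0 v = v := max_eq_right (hl v (List.mem_cons_self))
    simp [this]

theorem find_most_frequent_word_eq (words : List String) :
    find_most_frequent_word words = find_most_frequent_word_alt words := by
  unfold find_most_frequent_word find_most_frequent_word_alt
  dsimp only
  rw [dictA_eq, PySem.Dict.items_counter, PySem.List.dedup_eq_ofList]
  set lw := words.map PySem.Str.lower with hlw
  set S := PySem.Set.ofList lw with hS
  have hnn : ∀ p ∈ S.map (fun k => (k, (lw.count k : Int))), (0 : Int) ≤ p.2 := by
    intro p hp
    obtain ⟨k, _, rfl⟩ := List.mem_map.mp hp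
    exact Int.natCast_nonneg _
  rw [runmax _ [] 0 hnn]
  have hM : (S.map (fun k => (k, (lw.count k : Int)))).foldl (fun a p => max a p.2) 0
      = (S.map (fun k => (lw.count k : Int))).foldl max 0 := by
    rw [List.foldl_map, List.foldl_map]
  have hmax : (PySem.List.max? (S.map (fun w => (PySem.List.count lw w : Int))) (fun x => x)).getD 0
      = (S.map (fun k => (k, (lw.count k : Int)))).foldl (fun a p => max a p.2) 0 := by
    rw [hM]
    rw [max_eq _ (by intro v hv; obtain ⟨k, _, rfl⟩ := List.mem_map.mp hv; exact Int.natCast_nonneg _)]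
    rfl
  rw [hmax]
  simp [List.filter_map, Function.comp_def, List.map_map]

-- ===== VERDICT (by name: the statement is the Claim_ definition above) =====
theorem find_most_frequent_word_spec : Claim_equal_find_most_frequent_word := by
  intro words _
  exact find_most_frequent_word_eq words
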